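-- pv_equiv track=rewrite | github.com/SegataLab/metaclock | HomoAlignsGenerator_dev_3.py | check_max_uniq
-- ===== SOURCE A (Python) =====
-- def check_max_uniq(site_lst):
--
-- 	votes = {'A': 0, 'T': 0, 'G': 0, 'C': 0, '-': 0}
-- 	for s in site_lst:
-- 		if s in votes:
-- 			votes[s] += 1
-- 		else:
-- 			consensus = '-'
--
-- 	consensus = max(votes, key=votes.get)
--
-- 	return consensus
-- ===== SOURCE B (Python) =====
-- def check_max_uniq(site_lst):
--     # Sort kept sites by alphabet priority, then find the first longest run in one pass.
--     prio = {'A': 0, 'T': 1, 'G': 2, 'C': 3, '-': 4}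
--     xs = sorted(prio[s] for s in site_lst if s in prio)
--     consensus, best, run, prev = 'A', 0, 0, None
--     for v in xs:
--         run = run + 1 if v == prev else 1
--         prev = v
--         if run > best:
--             best, consensus = run, 'ATGC-'[v]
--     return consensus
-- ===== Notes on version B (the rewrite author's own statement) =====
-- stated objective: alternative
-- what changed: Replaces the vote dictionary and max-by-get argmax with sort-then-scan: sites are mapped to alphabet priorities, sorted, and the consensus is the base of the first longest run found by a single run-length scan (no per-base counting and no max call).
import Mathlib
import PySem

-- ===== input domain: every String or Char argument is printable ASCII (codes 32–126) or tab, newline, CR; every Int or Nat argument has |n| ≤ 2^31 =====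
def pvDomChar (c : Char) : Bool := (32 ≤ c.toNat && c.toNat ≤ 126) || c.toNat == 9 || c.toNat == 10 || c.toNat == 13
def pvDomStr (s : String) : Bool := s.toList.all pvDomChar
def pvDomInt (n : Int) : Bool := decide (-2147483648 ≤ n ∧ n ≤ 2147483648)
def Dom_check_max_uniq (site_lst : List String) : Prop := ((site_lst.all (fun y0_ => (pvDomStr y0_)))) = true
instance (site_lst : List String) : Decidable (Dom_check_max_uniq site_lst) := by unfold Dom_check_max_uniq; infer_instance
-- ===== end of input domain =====

-- B replaces A's vote dictionary and max-by-get argmax with sort-then-scan: sites are mapped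
-- to alphabet priorities, sorted, and the consensus is the base of the first longest run,
-- found by a single run-length scan (alternative algorithm, same results).

-- ===== PORT A =====
-- literal port: dict of votes, guarded increment (the dead `consensus = '-'` in the else
-- branch assigns a local that is unconditionally overwritten, so it is the identity here),
-- then max(votes, key=votes.get) = first key with maximal value.
def pvVotes (site_lst : List String) : PySem.Dict String Int :=
  site_lst.foldl (fun d s => if d.contains s then d.modify s 0 (· + 1) else d)
    (PySem.Dict.ofList [("A", 0), ("T", 0), ("G", 0), ("C", 0), ("-", 0)])

def check_max_uniq (site_lst : List String) : String :=
  PySem.List.maxD (pvVotes site_lst).keys (fun k => (pvVotes site_lst).getD k 0) ""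

-- ===== PORT B =====
-- priority of each base: prio = {'A': 0, 'T': 1, 'G': 2, 'C': 3, '-': 4}
def pvPrio : PySem.Dict String Int :=
  PySem.Dict.ofList [("A", 0), ("T", 1), ("G", 2), ("C", 3), ("-", 4)]

-- the generator `prio[s] for s in site_lst if s in prio`
def pvKept (s : String) : Option Int := if pvPrio.contains s then pvPrio.get? s else none

-- one iteration of B's for-loop; state = (consensus, best, run, prev).
-- `'ATGC-'[v]` is a one-char string; v is always 0..4 here so the `.getD ""` branch
-- (Python's IndexError) is unreachable.
def pvStepB (st : String × Int × Int × Option Int) (v : Int) : String × Int × Int × Option Int :=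
  let run : Int := if some v = st.2.2.2 then st.2.2.1 + 1 else 1
  if run > st.2.1 then
    (((PySem.Str.pyGet? "ATGC-" v).map (fun c => String.singleton c)).getD "", run, run, some v)
  else
    (st.1, st.2.1, run, some v)

def check_max_uniq_alt (site_lst : List String) : String :=
  ((PySem.List.sorted (site_lst.filterMap pvKept) (fun x => x) false).foldl
      pvStepB ("A", 0, 0, none)).1

-- ===== PRECONDITION & SPEC =====
def Spec_check_max_uniq (site_lst : List String) (out : String) : Prop := out = check_max_uniq_alt site_lst
instance (site_lst : List String) (out : String) : Decidable (Spec_check_max_uniq site_lst out) := by unfold Spec_check_max_uniq; infer_instance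

-- ===== CLAIM (what is proved, stated in full; the proofs are below) =====
def Claim_equal_check_max_uniq : Prop := ∀ (site_lst : List String), Dom_check_max_uniq site_lst → Spec_check_max_uniq site_lst (check_max_uniq site_lst)

-- ===== LEMMAS AND PROOFS =====

-- both sides reduce to this first-strict-maximum scan over the five counts
def pvScanA (l : List String) : String :=
  ((["A", "T", "G", "C", "-"] : List String).foldl
    (fun (st : Int × String) base =>
      if (PySem.List.count l base : Int) > st.1
      then ((PySem.List.count l base : Int), base) else st)
    (-1, "")).2

-- ----- A side -----

-- the vote loop never changes the key list (modify only hits existing keys)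
theorem loop_keys (l : List String) (d : PySem.Dict String Int) :
    (l.foldl (fun d s => if d.contains s then d.modify s 0 (· + 1) else d) d).keys = d.keys := by
  induction l generalizing d with
  | nil => rfl
  | cons s t ih =>
    simp only [List.foldl_cons]
    by_cases h : d.contains s = true
    · rw [if_pos h, ih, PySem.Dict.keys_modify, PySem.Dict.keys_insert_of_contains _ _ h]
    · rw [if_neg h, ih]

-- value of the vote dict at a contained key: initial value plus the number of occurrences
theorem loop_getD (l : List String) (d : PySem.Dict String Int) (v : String)
    (hv : d.contains v = true) :
    (l.foldl (fun d s => if d.contains s then d.modify s 0 (· + 1) else d) d).getD v 0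
      = d.getD v 0 + l.count v := by
  induction l generalizing d with
  | nil => simp
  | cons s t ih =>
    simp only [List.foldl_cons]
    by_cases h : d.contains s = true
    · rw [if_pos h, ih _ (by simp [PySem.Dict.contains_modify, hv]),
        PySem.Dict.getD_modify]
      by_cases hvs : v = s
      · subst hvs; simp; ring
      · have : s ≠ v := fun h' => hvs h'.symm
        simp [hvs, this]
    · have hs : s ≠ v := by rintro rfl; rw [hv] at h; exact h rfl
      rw [if_neg h, ih _ hv, List.count_cons]
      simp [hs]

-- first-maximum fold of Python max (from a `some` seed) = strict-greater running scan
theorem link (f : String → Int) (g : Option String → String → Option String)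
    (hg : ∀ m x, g (some m) x = if f m < f x then some x else some m)
    (xs : List String) (m : String) :
    List.foldl g (some m) xs
    = some ((List.foldl (fun (st : Int × String) base =>
        if f base > st.1 then (f base, base) else st) (f m, m) xs).2) := by
  induction xs generalizing m with
  | nil => rfl
  | cons x t ih =>
    rw [List.foldl_cons, List.foldl_cons, hg]
    by_cases h : f m < f x
    · rw [if_pos h, if_pos (by omega : f x > (f m, m).1)]; exact ih x
    · rw [if_neg h, if_neg (by simpa using h : ¬ f x > (f m, m).1)]; exact ih m

-- the same from the empty seed: the first element always wins against the -1 start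
theorem link0 (f : String → Int) (g : Option String → String → Option String)
    (hg0 : ∀ x, g none x = some x)
    (hg : ∀ m x, g (some m) x = if f m < f x then some x else some m)
    (x : String) (xs : List String) (hx : 0 ≤ f x) :
    List.foldl g none (x :: xs)
    = some ((List.foldl (fun (st : Int × String) base =>
        if f base > st.1 then (f base, base) else st) ((-1 : Int), "") (x :: xs)).2) := by
  rw [List.foldl_cons, hg0, List.foldl_cons,
    if_pos (by simpa using (by omega : (-1:Int) < f x) : f x > ((-1 : Int), "").1),
    link f g hg]

-- `max(keys, key=f)` over the five fixed keys = the strict-greater running scan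
theorem five_scan (f : String → Int) (h0 : ∀ v ∈ (["A", "T", "G", "C", "-"] : List String), 0 ≤ f v) :
    PySem.List.maxD ["A", "T", "G", "C", "-"] f ""
      = ((["A", "T", "G", "C", "-"] : List String).foldl
          (fun (st : Int × String) base => if f base > st.1 then (f base, base) else st)
          (-1, "")).2 := by
  have hA := h0 "A" (by simp)
  simp only [PySem.List.maxD, PySem.List.max?]
  rw [link0 f _ (fun x => rfl) (fun m x => rfl) "A" ["T", "G", "C", "-"] hA]
  rfl

theorem A_eq_scan (l : List String) : check_max_uniq l = pvScanA l := by
  unfold check_max_uniq pvVotes pvScanA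
  have hd : ∀ v ∈ (["A", "T", "G", "C", "-"] : List String),
      (PySem.Dict.ofList [("A", (0:Int)), ("T", 0), ("G", 0), ("C", 0), ("-", 0)]).contains v = true := by
    decide
  have hk := loop_keys l (PySem.Dict.ofList [("A", (0:Int)), ("T", 0), ("G", 0), ("C", 0), ("-", 0)])
  have h0 : ∀ v ∈ (["A", "T", "G", "C", "-"] : List String),
      (PySem.Dict.ofList [("A", (0:Int)), ("T", 0), ("G", 0), ("C", 0), ("-", 0)]).getD v 0 = 0 := by
    decide
  rw [show (PySem.Dict.ofList [("A", (0:Int)), ("T", 0), ("G", 0), ("C", 0), ("-", 0)]).keys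
      = ["A", "T", "G", "C", "-"] from rfl] at hk
  rw [hk, five_scan _ (by
    intro v hv
    rw [loop_getD l _ v (hd v hv), h0 v hv, zero_add]
    positivity)]
  simp only [List.foldl_cons, List.foldl_nil, PySem.List.count]
  rw [loop_getD l _ "A" (hd "A" (by simp)), h0 "A" (by simp),
    loop_getD l _ "T" (hd "T" (by simp)), h0 "T" (by simp),
    loop_getD l _ "G" (hd "G" (by simp)), h0 "G" (by simp),
    loop_getD l _ "C" (hd "C" (by simp)), h0 "C" (by simp),
    loop_getD l _ "-" (hd "-" (by simp)), h0 "-" (by simp)]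
  simp

-- ----- B side -----

-- pointwise value of the kept-site map
theorem kept_char (s : String) :
    pvKept s = if s = "A" then some 0 else if s = "T" then some 1 else if s = "G" then some 2
      else if s = "C" then some 3 else if s = "-" then some 4 else none := by
  by_cases h1 : s = "A"
  · subst h1; rfl
  rw [if_neg h1]
  by_cases h2 : s = "T"
  · subst h2; rfl
  rw [if_neg h2]
  by_cases h3 : s = "G"
  · subst h3; rfl
  rw [if_neg h3]
  by_cases h4 : s = "C"
  · subst h4; rfl
  rw [if_neg h4]
  by_cases h5 : s = "-"
  · subst h5; rfl
  rw [if_neg h5]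
  have hc : pvPrio.contains s = false := by
    simp [pvPrio, pysem, PySem.Dict.contains]
    intro a b hab
    rw [show (PySem.Dict.ofList [("A", (0:Int)), ("T", 1), ("G", 2), ("C", 3), ("-", 4)]).items
        = [("A", 0), ("T", 1), ("G", 2), ("C", 3), ("-", 4)] from rfl] at hab
    simp at hab
    rcases hab with ⟨rfl, _⟩ | ⟨rfl, _⟩ | ⟨rfl, _⟩ | ⟨rfl, _⟩ | ⟨rfl, _⟩ <;> simp_all [eq_comm]
  simp [pvKept, hc]

-- the sorted priority list is the concatenation of one constant block per base
def pvR (l : List String) : List Int :=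
  List.replicate (l.count "A") 0 ++ List.replicate (l.count "T") 1 ++
  List.replicate (l.count "G") 2 ++ List.replicate (l.count "C") 3 ++
  List.replicate (l.count "-") 4

-- counting helpers for the permutation argument
theorem count_kept (l : List String) (w : String) (i : Int)
    (hw : pvKept w = some i)
    (hi : ∀ s, pvKept s = some i → s = w) :
    (l.filterMap pvKept).count i = l.count w := by
  rw [List.count_filterMap, List.count_eq_countP]
  refine List.countP_congr (fun s _ => ?_)
  simp only [beq_iff_eq]
  constructor
  · intro h; exact hi s (by rw [h])
  · intro h; rw [h, hw]

theorem count_kept_zero (l : List String) (i : Int)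
    (hi : ∀ s, pvKept s ≠ some i) :
    (l.filterMap pvKept).count i = 0 := by
  rw [List.count_filterMap, List.countP_eq_zero]
  intro s _
  simp only [beq_iff_eq]
  exact hi s

theorem sorted_eq_blocks (l : List String) :
    PySem.List.sorted (l.filterMap pvKept) (fun x => x) false = pvR l := by
  apply PySem.List.sorted_id_eq_of_perm_of_pairwise
  · rw [List.perm_iff_count]
    intro a
    by_cases h0 : a = 0
    · subst h0
      simp only [pvR, List.count_append, List.count_replicate]
      rw [count_kept l "A" 0 (by rw [kept_char]; rfl)
        (fun s h => by rw [kept_char] at h; split_ifs at h <;> simp_all)]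
      simp
    by_cases h1 : a = 1
    · subst h1
      simp only [pvR, List.count_append, List.count_replicate]
      rw [count_kept l "T" 1 (by rw [kept_char]; rfl)
        (fun s h => by rw [kept_char] at h; split_ifs at h <;> simp_all)]
      simp
    by_cases h2 : a = 2
    · subst h2
      simp only [pvR, List.count_append, List.count_replicate]
      rw [count_kept l "G" 2 (by rw [kept_char]; rfl)
        (fun s h => by rw [kept_char] at h; split_ifs at h <;> simp_all)]
      simp
    by_cases h3 : a = 3
    · subst h3
      simp only [pvR, List.count_append, List.count_replicate]
      rw [count_kept l "C" 3 (by rw [kept_char]; rfl)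
        (fun s h => by rw [kept_char] at h; split_ifs at h <;> simp_all)]
      simp
    by_cases h4 : a = 4
    · subst h4
      simp only [pvR, List.count_append, List.count_replicate]
      rw [count_kept l "-" 4 (by rw [kept_char]; rfl)
        (fun s h => by rw [kept_char] at h; split_ifs at h <;> simp_all)]
      simp
    rw [count_kept_zero l a (fun s h => by
      rw [kept_char] at h; split_ifs at h <;> simp_all)]
    simp only [pvR, List.count_append, List.count_replicate, beq_iff_eq]
    rw [if_neg (by omega : ¬((0:Int) = a)), if_neg (by omega : ¬((1:Int) = a)),
      if_neg (by omega : ¬((2:Int) = a)), if_neg (by omega : ¬((3:Int) = a)),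
      if_neg (by omega : ¬((4:Int) = a))]
  · simp only [pvR, List.pairwise_append, List.mem_replicate, List.mem_append,
      List.pairwise_replicate]
    refine ⟨⟨⟨⟨?_, ?_, ?_⟩, ?_, ?_⟩, ?_, ?_⟩, ?_, ?_⟩ <;> omega

def pvLetter (v : Int) : String :=
  ((PySem.Str.pyGet? "ATGC-" v).map (fun c => String.singleton c)).getD ""

-- one applied step of B's loop, spelled out
theorem stepB_app (cons : String) (b r : Int) (p : Option Int) (v : Int) :
    pvStepB (cons, b, r, p) v =
      if (if some v = p then r + 1 else 1) > b
      then (pvLetter v, (if some v = p then r + 1 else 1), (if some v = p then r + 1 else 1), some v)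
      else (cons, b, (if some v = p then r + 1 else 1), some v) := rfl

theorem fold_rep_same (c : Nat) (x : Int) (cons : String) (b r : Int) (hr : r ≤ b) :
    List.foldl pvStepB (cons, b, r, some x) (List.replicate c x)
      = (if r + c > b then pvLetter x else cons, if r + c > b then r + (c:Int) else b,
         r + (c:Int), some x) := by
  induction c generalizing cons b r with
  | zero =>
    simp only [List.replicate, List.foldl_nil, Nat.cast_zero, add_zero]
    rw [if_neg (by omega), if_neg (by omega)]
  | succ c ih =>
    rw [List.replicate_succ, List.foldl_cons, stepB_app]
    have hpp : (if some x = some x then r + 1 else 1) = r + 1 := if_pos rfl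
    rw [hpp]
    by_cases h : r + 1 > b
    · rw [if_pos h, ih _ _ _ (le_refl _)]
      refine Prod.ext ?_ (Prod.ext ?_ (Prod.ext ?_ rfl)) <;> push_cast <;>
        (try split_ifs) <;> first | rfl | omega
    · rw [if_neg h, ih _ _ _ (by omega)]
      refine Prod.ext ?_ (Prod.ext ?_ (Prod.ext ?_ rfl)) <;> push_cast <;>
        (try split_ifs) <;> first | rfl | omega

theorem fold_rep_new (c : Nat) (x : Int) (cons : String) (b r : Int) (p : Option Int)
    (hp : p ≠ some x) (hb : 0 ≤ b) :
    List.foldl pvStepB (cons, b, r, p) (List.replicate c x)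
      = (if (c:Int) > b then pvLetter x else cons, if (c:Int) > b then (c:Int) else b,
         if c = 0 then r else (c:Int), if c = 0 then p else some x) := by
  cases c with
  | zero =>
    simp only [List.replicate, List.foldl_nil, Nat.cast_zero]
    rw [if_neg (by omega), if_neg (by omega)]
    simp
  | succ c =>
    rw [List.replicate_succ, List.foldl_cons, stepB_app]
    have hpp : (if some x = p then r + 1 else 1) = 1 := if_neg (fun h => hp h.symm)
    rw [hpp]
    by_cases h : (1:Int) > b
    · rw [if_pos h, fold_rep_same c x _ _ _ (le_refl _)]
      refine Prod.ext ?_ (Prod.ext ?_ (Prod.ext ?_ ?_)) <;> push_cast <;>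
        (try split_ifs) <;> first | rfl | omega
    · rw [if_neg h, fold_rep_same c x _ _ _ (by omega)]
      refine Prod.ext ?_ (Prod.ext ?_ (Prod.ext ?_ ?_)) <;> push_cast <;>
        (try split_ifs) <;> first | rfl | omega

set_option maxHeartbeats 4000000 in
theorem B_eq_scan (l : List String) : check_max_uniq_alt l = pvScanA l := by
  unfold check_max_uniq_alt
  rw [sorted_eq_blocks]
  unfold pvR pvScanA
  simp only [List.foldl_append, List.foldl_cons, List.foldl_nil, PySem.List.count_eq]
  generalize List.count "A" l = nA
  generalize List.count "T" l = nT
  generalize List.count "G" l = nG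
  generalize List.count "C" l = nC
  generalize List.count "-" l = nD
  rw [fold_rep_new nA 0 _ _ _ _ (by simp) le_rfl]
  rw [fold_rep_new nT 1 _ _ _ _ (by split_ifs <;> simp) (by split_ifs <;> omega)]
  rw [fold_rep_new nG 2 _ _ _ _ (by split_ifs <;> simp) (by split_ifs <;> omega)]
  rw [fold_rep_new nC 3 _ _ _ _ (by split_ifs <;> simp) (by split_ifs <;> omega)]
  rw [fold_rep_new nD 4 _ _ _ _ (by split_ifs <;> simp) (by split_ifs <;> omega)]
  have e0 : pvLetter 0 = "A" := rfl
  have e1 : pvLetter 1 = "T" := rfl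
  have e2 : pvLetter 2 = "G" := rfl
  have e3 : pvLetter 3 = "C" := rfl
  have e4 : pvLetter 4 = "-" := rfl
  rw [e0, e1, e2, e3, e4]
  simp only [ite_self]
  rw [show (if ((nA:Int)) > 0 then ((nA:Int)) else (0:Int)) = (nA:Int) from by split_ifs <;> omega]
  rw [if_pos (show ((nA:Int)) > -1 from by omega)]
  simp only [apply_ite Prod.fst, apply_ite Prod.snd]

-- ===== VERDICT (by name: the statement is the Claim_ definition above) =====
theorem check_max_uniq_spec : Claim_equal_check_max_uniq := by
  intro l _
  unfold Spec_check_max_uniq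
  rw [A_eq_scan, B_eq_scan]
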